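-- pv_equiv track=rewrite | github.com/hyunjun/practice | python/problem-sort/sort_integers_by_the_power_value.py | getKth
-- ===== SOURCE A (Python) =====
-- def getKth(lo: int, hi: int, k: int) -> int:
--     if not (1 <= lo <= 1000) or not (1 <= hi <= 1000) or not (1 <= k <= hi - lo + 1):
--         return 0
--
--     d = {}
--     def power(nums, n, acc):
--         nums.append(n)
--         if n in d:
--             acc += d[n]
--             for num in nums:
--                 d[num] = acc
--                 acc -= 1
--         elif n == 1:
--             for num in nums:
--                 d[num] = acc
--                 acc -= 1
--         else:
--             if n % 2 == 0:
--                 power(nums, n // 2, acc + 1)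
--             else:
--                 power(nums, 3 * n + 1, acc + 1)
--
--     for i in range(lo, hi + 1):
--         if i not in d:
--             power([], i, 0)
--
--     return sorted([i for i in range(lo, hi + 1)], key=lambda i: d[i])[k - 1]
-- ===== SOURCE B (Python) =====
-- def getKth(lo: int, hi: int, k: int) -> int:
--     if not (1 <= lo <= 1000) or not (1 <= hi <= 1000) or not (1 <= k <= hi - lo + 1):
--         return 0
--
--     def steps(n):
--         c = 0
--         while n != 1:
--             n = n // 2 if n % 2 == 0 else 3 * n + 1
--             c += 1
--         return c
--
--     return sorted(range(lo, hi + 1), key=steps)[k - 1]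
-- ===== Notes on version B (the rewrite author's own statement) =====
-- stated objective: simpler
-- what changed: A's memoized path-carrying recursion (a shared dict plus a 'power' helper that records the whole Collatz path and back-fills step counts) is replaced by a plain iterative per-integer Collatz step counter used directly as the sort key.
import Mathlib
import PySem

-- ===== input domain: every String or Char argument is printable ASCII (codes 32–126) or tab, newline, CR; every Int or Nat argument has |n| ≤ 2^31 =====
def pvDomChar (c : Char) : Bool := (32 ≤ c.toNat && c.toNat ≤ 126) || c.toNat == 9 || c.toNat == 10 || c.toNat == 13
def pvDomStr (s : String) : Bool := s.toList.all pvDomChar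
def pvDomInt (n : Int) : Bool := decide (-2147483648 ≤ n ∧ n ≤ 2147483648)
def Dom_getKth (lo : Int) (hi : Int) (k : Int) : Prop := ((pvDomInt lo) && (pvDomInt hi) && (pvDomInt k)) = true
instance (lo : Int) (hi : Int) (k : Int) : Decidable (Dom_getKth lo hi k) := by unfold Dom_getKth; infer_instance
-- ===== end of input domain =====

-- B replaces A's memoized mutual path-recursion with a plain iterative Collatz step counter per
-- integer (objective: simpler); same guard, same stable sort, same k-th pick.

-- ===== PORT A =====
-- the memo-assignment loop 'for num in nums: d[num] = acc; acc -= 1' as a foldl over (dict, acc)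
def pvAssign (l : List Int) (d : PySem.Dict Int Int) (acc : Int) : PySem.Dict Int Int :=
  (l.foldl (fun (s : PySem.Dict Int Int × Int) num => (s.1.insert num s.2, s.2 - 1)) (d, acc)).1

-- Python's 'power' recursion; the Nat fuel only makes the same recursion total (never exhausted
-- on admitted inputs, where every Collatz path from n ≤ 1000 reaches 1 in < 500 steps)
def powerA : Nat → PySem.Dict Int Int → List Int → Int → Int → PySem.Dict Int Int
  | 0, d, _, _, _ => d
  | f + 1, d, nums, n, acc =>
    let nums' := nums ++ [n]
    match d.get? n with
    | some v => pvAssign nums' d (acc + v)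
    | none =>
      if n = 1 then pvAssign nums' d acc
      else if PySem.Int.mod n 2 = 0 then powerA f d nums' (PySem.Int.floordiv n 2) (acc + 1)
      else powerA f d nums' (3 * n + 1) (acc + 1)

def getKth (lo : Int) (hi : Int) (k : Int) : Int :=
  if ¬(1 ≤ lo ∧ lo ≤ 1000) ∨ ¬(1 ≤ hi ∧ hi ≤ 1000) ∨ ¬(1 ≤ k ∧ k ≤ hi - lo + 1) then 0
  else
    let d := (PySem.List.pyRange lo (hi + 1) 1).foldl
      (fun d i => if d.contains i then d else powerA 500 d [] i 0) PySem.Dict.empty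
    -- Python's d[i]: the key is always present for i in the range (proved below), so getD is exact
    (PySem.List.pyGet? (PySem.List.sorted (PySem.List.pyRange lo (hi + 1) 1)
        (fun i => d.getD i 0) false) (k - 1)).getD 0

-- ===== PORT B =====
-- Source B's 'steps': iterative while-loop; fuel only makes the loop total (never exhausted on
-- admitted inputs)
def stepsB : Nat → Int → Int → Int
  | 0, _, c => c
  | f + 1, n, c =>
    if n = 1 then c
    else stepsB f (if PySem.Int.mod n 2 = 0 then PySem.Int.floordiv n 2 else 3 * n + 1) (c + 1)

def getKth_alt (lo : Int) (hi : Int) (k : Int) : Int :=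
  if ¬(1 ≤ lo ∧ lo ≤ 1000) ∨ ¬(1 ≤ hi ∧ hi ≤ 1000) ∨ ¬(1 ≤ k ∧ k ≤ hi - lo + 1) then 0
  else
    (PySem.List.pyGet? (PySem.List.sorted (PySem.List.pyRange lo (hi + 1) 1)
        (fun n => stepsB 500 n 0) false) (k - 1)).getD 0

-- ===== PRECONDITION & SPEC =====
def Spec_getKth (lo : Int) (hi : Int) (k : Int) (out : Int) : Prop := out = getKth_alt lo hi k
instance (lo : Int) (hi : Int) (k : Int) (out : Int) : Decidable (Spec_getKth lo hi k out) := by unfold Spec_getKth; infer_instance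

-- ===== CLAIM (what is proved, stated in full; the proofs are below) =====
def Claim_equal_getKth : Prop := ∀ (lo : Int) (hi : Int) (k : Int), Dom_getKth lo hi k → Spec_getKth lo hi k (getKth lo hi k)

-- ===== LEMMAS AND PROOFS =====

-- the Collatz successor both programs step with
def pvNxt (n : Int) : Int :=
  if PySem.Int.mod n 2 = 0 then PySem.Int.floordiv n 2 else 3 * n + 1

-- fueled Collatz step count (proof-side specification)
def pvCs : Nat → Int → Option Int
  | 0, _ => none
  | f + 1, n => if n = 1 then some 0 else (pvCs f (pvNxt n)).map (· + 1)

def pvReach (n w : Int) : Prop := ∃ f, pvCs f n = some w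

def pvGood (d : PySem.Dict Int Int) : Prop := ∀ m w, d.get? m = some w → pvReach m w

theorem pvCs_mono : ∀ (f g : Nat) (n w : Int), pvCs f n = some w → f ≤ g → pvCs g n = some w := by
  intro f
  induction f with
  | zero => intro g n w h _; simp [pvCs] at h
  | succ f ih =>
    intro g n w h hle
    obtain ⟨g, rfl⟩ : ∃ g', g = g' + 1 := ⟨g - 1, by omega⟩
    by_cases hn : n = 1
    · simpa [pvCs, hn] using h
    · simp only [pvCs, hn, if_false] at h ⊢
      obtain ⟨w', hw', rfl⟩ := Option.map_eq_some_iff.mp h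
      rw [ih g (pvNxt n) w' hw' (by omega)]; rfl

theorem pvReach_unique {n w w' : Int} (h : pvReach n w) (h' : pvReach n w') : w = w' := by
  obtain ⟨f, hf⟩ := h
  obtain ⟨g, hg⟩ := h'
  have h1 := pvCs_mono f (max f g) n w hf (Nat.le_max_left f g)
  have h2 := pvCs_mono g (max f g) n w' hg (Nat.le_max_right f g)
  rw [h1] at h2; injection h2

theorem pvReach_succ {n w : Int} (hn : n ≠ 1) (h : pvReach (pvNxt n) w) : pvReach n (w + 1) := by
  obtain ⟨f, hf⟩ := h
  exact ⟨f + 1, by simp [pvCs, hn, hf]⟩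

theorem pvStepsB_of_cs : ∀ (f F : Nat) (n c w : Int), pvCs f n = some w → f ≤ F →
    stepsB F n c = c + w := by
  intro f
  induction f with
  | zero => intro F n c w h _; simp [pvCs] at h
  | succ f ih =>
    intro F n c w h hle
    obtain ⟨F, rfl⟩ : ∃ F', F = F' + 1 := ⟨F - 1, by omega⟩
    by_cases hn : n = 1
    · simp only [pvCs, hn, if_true, Option.some.injEq] at h
      simp [stepsB, hn, ← h]
    · simp only [pvCs, hn, if_false] at h
      obtain ⟨w', hw', rfl⟩ := Option.map_eq_some_iff.mp h
      have : stepsB (F + 1) n c = stepsB F (pvNxt n) (c + 1) := by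
        simp [stepsB, hn, pvNxt]
      rw [this, ih F (pvNxt n) (c + 1) w' hw' (by omega)]; ring

theorem pvReach_of_chain : ∀ (l : List Int) (n v : Int),
    (l ++ [n]).IsChain (fun a b => pvNxt a = b) → (∀ m ∈ l, m ≠ 1) → pvReach n v →
    ∀ j (h : j < l.length + 1),
      pvReach ((l ++ [n])[j]'(by simp; omega)) (v + ((l.length - j : Nat) : Int)) := by
  intro l
  induction l with
  | nil =>
    intro n v _ _ hv j hj
    simp only [List.length_nil] at hj
    have hj0 : j = 0 := by omega
    subst hj0; simpa using hv
  | cons a l ih =>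
    intro n v hch h1 hv j hj
    simp only [List.length_cons] at hj
    rw [List.cons_append, List.isChain_cons] at hch
    obtain ⟨hhd, htl⟩ := hch
    have ihall := ih n v htl (fun m hm => h1 m (List.mem_cons_of_mem a hm)) hv
    match j with
    | 0 =>
      have h0 := ihall 0 (by omega)
      have hhead : pvNxt a = (l ++ [n])[0]'(by simp) := by
        apply hhd
        simp [List.head?_eq_some_head (by simp : l ++ [n] ≠ []), List.head_eq_getElem]
      have ha1 : a ≠ 1 := h1 a (List.mem_cons_self)
      have h2 := pvReach_succ ha1 (hhead ▸ h0)
      simp only [List.cons_append, List.getElem_cons_zero]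
      convert h2 using 1
      simp only [Nat.sub_zero, List.length_cons]
      push_cast
      ring
    | j + 1 =>
      have hsucc := ihall j (by omega)
      simp only [List.cons_append, List.getElem_cons_succ]
      have hlen : ((a :: l).length - (j + 1)) = (l.length - j) := by
        simp only [List.length_cons]; omega
      rw [hlen]
      exact hsucc

theorem pvAssign_spec : ∀ (l : List Int) (d : PySem.Dict Int Int) (a : Int),
    (∀ j (h : j < l.length), pvReach l[j] (a - j)) → pvGood d →
    pvGood (pvAssign l d a) ∧
    (∀ m, d.contains m = true → (pvAssign l d a).contains m = true) ∧
    (∀ m ∈ l, (pvAssign l d a).contains m = true) := by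
  intro l
  induction l with
  | nil =>
    intro d a _ hg
    exact ⟨hg, fun m hm => hm, by simp⟩
  | cons x l ih =>
    intro d a hr hg
    have hstep : pvAssign (x :: l) d a = pvAssign l (d.insert x a) (a - 1) := rfl
    have hgx : pvGood (d.insert x a) := by
      intro m w hmw
      by_cases hmx : m = x
      · subst hmx
        rw [PySem.Dict.get?_insert_self] at hmw
        injection hmw with haw
        subst haw
        have h0 := hr 0 (by simp)
        simpa using h0
      · rw [PySem.Dict.get?_insert_of_ne d a hmx] at hmw
        exact hg m w hmw
    have hr' : ∀ j (h : j < l.length), pvReach l[j] ((a - 1) - j) := by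
      intro j h
      have hj1 := hr (j + 1) (by simp only [List.length_cons]; omega)
      simp only [List.getElem_cons_succ] at hj1
      convert hj1 using 1
      push_cast; ring
    obtain ⟨hA, hB, hC⟩ := ih (d.insert x a) (a - 1) hr' hgx
    rw [hstep]
    refine ⟨hA, ?_, ?_⟩
    · intro m hm
      refine hB m ?_
      rw [PySem.Dict.contains_insert d x m a]
      simp [hm]
    · intro m hm
      rcases List.mem_cons.mp hm with rfl | hm'
      · refine hB m ?_
        rw [PySem.Dict.contains_insert d m m a]
        simp
      · exact hC m hm'

theorem pvPowerA_spec : ∀ (f : Nat) (d : PySem.Dict Int Int) (nums : List Int) (n acc w : Int),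
    pvCs f n = some w → pvGood d → acc = (nums.length : Int) →
    (nums ++ [n]).IsChain (fun a b => pvNxt a = b) → (∀ m ∈ nums, m ≠ 1) →
    pvGood (powerA f d nums n acc) ∧
    (∀ m, d.contains m = true → (powerA f d nums n acc).contains m = true) ∧
    (powerA f d nums n acc).contains n = true ∧
    (∀ m ∈ nums, (powerA f d nums n acc).contains m = true) := by
  intro f
  induction f with
  | zero => intro d nums n acc w h _ _ _ _; simp [pvCs] at h
  | succ f ih =>
    intro d nums n acc w hcs hg hacc hch h1
    subst hacc
    cases hdn : d.get? n with
    | some v =>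
      have hpw : powerA (f + 1) d nums n ((nums.length : Nat) : Int) =
          pvAssign (nums ++ [n]) d (((nums.length : Nat) : Int) + v) := by
        simp [powerA, hdn]
      have hreach := pvReach_of_chain nums n v hch h1 (hg n v hdn)
      have hassign := pvAssign_spec (nums ++ [n]) d (((nums.length : Nat) : Int) + v)
        (by
          intro j hj
          simp only [List.length_append, List.length_cons, List.length_nil] at hj
          have hrr := hreach j (by omega)
          convert hrr using 1
          omega) hg
      rw [hpw]
      exact ⟨hassign.1, fun m hm => hassign.2.1 m hm, hassign.2.2 n (by simp),
        fun m hm => hassign.2.2 m (by simp [hm])⟩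
    | none =>
      by_cases hn1 : n = 1
      · subst hn1
        have hpw : powerA (f + 1) d nums 1 ((nums.length : Nat) : Int) =
            pvAssign (nums ++ [1]) d ((nums.length : Nat) : Int) := by
          simp [powerA, hdn]
        have hreach := pvReach_of_chain nums 1 0 hch h1 ⟨1, by simp [pvCs]⟩
        have hassign := pvAssign_spec (nums ++ [1]) d ((nums.length : Nat) : Int)
          (by
            intro j hj
            simp only [List.length_append, List.length_cons, List.length_nil] at hj
            have hrr := hreach j (by omega)
            convert hrr using 1
            omega) hg
        rw [hpw]
        exact ⟨hassign.1, fun m hm => hassign.2.1 m hm, hassign.2.2 1 (by simp),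
          fun m hm => hassign.2.2 m (by simp [hm])⟩
      · have hpw : powerA (f + 1) d nums n ((nums.length : Nat) : Int) =
            powerA f d (nums ++ [n]) (pvNxt n) (((nums.length : Nat) : Int) + 1) := by
          simp only [powerA, hdn, hn1, if_false, pvNxt]
          split <;> rfl
        simp only [pvCs, hn1, if_false] at hcs
        obtain ⟨w', hw', rfl⟩ := Option.map_eq_some_iff.mp hcs
        have hch' : ((nums ++ [n]) ++ [pvNxt n]).IsChain (fun a b => pvNxt a = b) := by
          rw [List.isChain_append]
          exact ⟨hch, by simp, by simp⟩
        have h1' : ∀ m ∈ nums ++ [n], m ≠ 1 := by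
          intro m hm
          rcases List.mem_append.mp hm with hm' | hm'
          · exact h1 m hm'
          · simp at hm'; subst hm'; exact hn1
        have hacc' : (((nums.length : Nat) : Int) + 1) = (((nums ++ [n]).length : Nat) : Int) := by
          simp
        obtain ⟨hA, hB, hC, hD⟩ := ih d (nums ++ [n]) (pvNxt n)
          (((nums.length : Nat) : Int) + 1) w' hw' hg hacc' hch' h1'
        rw [hpw]
        exact ⟨hA, hB, hD n (by simp), fun m hm => hD m (by simp [hm])⟩

set_option maxRecDepth 100000 in
set_option maxHeartbeats 4000000 in
theorem pvCs_all_bool : (List.range 1000).all (fun j => (pvCs 500 ((j : Int) + 1)).isSome) = true := by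
  decide

theorem pvCs_all : ∀ n : Int, 1 ≤ n → n ≤ 1000 → ∃ w, pvCs 500 n = some w := by
  intro n h1 h2
  have hj : (n - 1).toNat < 1000 := by omega
  have hb := List.all_eq_true.mp pvCs_all_bool ((n - 1).toNat) (List.mem_range.mpr hj)
  have hn : (((n - 1).toNat : Nat) : Int) + 1 = n := by omega
  rw [hn] at hb
  rcases hopt : pvCs 500 n with _ | w
  · rw [hopt] at hb; simp at hb
  · exact ⟨w, rfl⟩

theorem pvLoop_spec : ∀ (l : List Int) (d : PySem.Dict Int Int),
    pvGood d → (∀ i ∈ l, ∃ w, pvCs 500 i = some w) →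
    pvGood (l.foldl (fun d i => if d.contains i then d else powerA 500 d [] i 0) d) ∧
    (∀ m, d.contains m = true →
      (l.foldl (fun d i => if d.contains i then d else powerA 500 d [] i 0) d).contains m = true) ∧
    (∀ i ∈ l, (l.foldl (fun d i => if d.contains i then d else powerA 500 d [] i 0) d).contains i = true) := by
  intro l
  induction l with
  | nil => intro d hg _; exact ⟨hg, fun m hm => hm, by simp⟩
  | cons i l ih =>
    intro d hg hall
    have hstep : ((i :: l).foldl (fun d i => if d.contains i then d else powerA 500 d [] i 0) d) =
        (l.foldl (fun d i => if d.contains i then d else powerA 500 d [] i 0)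
          (if d.contains i then d else powerA 500 d [] i 0)) := rfl
    by_cases hc : d.contains i = true
    · simp only [hstep, hc, if_true]
      obtain ⟨hA, hB, hC⟩ := ih d hg (fun j hj => hall j (List.mem_cons_of_mem i hj))
      refine ⟨hA, hB, ?_⟩
      intro j hj
      rcases List.mem_cons.mp hj with rfl | hj'
      · exact hB j hc
      · exact hC j hj'
    · obtain ⟨w, hw⟩ := hall i List.mem_cons_self
      obtain ⟨hA0, hB0, hC0, _⟩ := pvPowerA_spec 500 d [] i 0 w hw hg (by simp) (by simp) (by simp)
      simp only [hstep, hc]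
      obtain ⟨hA, hB, hC⟩ := ih (powerA 500 d [] i 0) hA0
        (fun j hj => hall j (List.mem_cons_of_mem i hj))
      refine ⟨hA, fun m hm => hB m (hB0 m hm), ?_⟩
      intro j hj
      rcases List.mem_cons.mp hj with rfl | hj'
      · exact hB j hC0
      · exact hC j hj'

theorem pvInsertBy_congr (k1 k2 : Int → Int) (x : Int) (ys : List Int) (hx : k1 x = k2 x)
    (hys : ∀ y ∈ ys, k1 y = k2 y) :
    PySem.List.insertBy (fun a b => decide (k1 a < k1 b)) x ys =
    PySem.List.insertBy (fun a b => decide (k2 a < k2 b)) x ys := by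
  induction ys with
  | nil => rfl
  | cons y ys ih =>
    have hy := hys y List.mem_cons_self
    simp only [PySem.List.insertBy, hx, hy]
    split
    · rfl
    · rw [ih (fun z hz => hys z (List.mem_cons_of_mem y hz))]

theorem pvFoldl_insertBy_congr (k1 k2 : Int → Int) : ∀ (xs acc : List Int),
    (∀ x ∈ xs, k1 x = k2 x) → (∀ x ∈ acc, k1 x = k2 x) →
    xs.foldl (fun acc x => PySem.List.insertBy (fun a b => decide (k1 a < k1 b)) x acc) acc =
    xs.foldl (fun acc x => PySem.List.insertBy (fun a b => decide (k2 a < k2 b)) x acc) acc := by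
  intro xs
  induction xs with
  | nil => intro acc _ _; rfl
  | cons x xs ih =>
    intro acc hxs hacc
    simp only [List.foldl_cons]
    rw [pvInsertBy_congr k1 k2 x acc (hxs x List.mem_cons_self) hacc]
    exact ih _ (fun z hz => hxs z (List.mem_cons_of_mem x hz))
      (fun z hz => (PySem.List.mem_insertBy _ x z acc).mp hz |>.elim
        (fun h => h ▸ hxs x List.mem_cons_self) (fun h => hacc z h))

theorem pvSorted_congr (k1 k2 : Int → Int) (xs : List Int) (h : ∀ x ∈ xs, k1 x = k2 x) :
    PySem.List.sorted xs k1 false = PySem.List.sorted xs k2 false := by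
  rw [PySem.List.sorted_eq_foldl_insertBy, PySem.List.sorted_eq_foldl_insertBy]
  exact pvFoldl_insertBy_congr k1 k2 xs [] h (by simp)

-- ===== VERDICT (by name: the statement is the Claim_ definition above) =====
theorem getKth_spec : Claim_equal_getKth := by
  unfold Claim_equal_getKth
  intro lo hi k _
  unfold Spec_getKth getKth getKth_alt
  by_cases hg : ¬(1 ≤ lo ∧ lo ≤ 1000) ∨ ¬(1 ≤ hi ∧ hi ≤ 1000) ∨ ¬(1 ≤ k ∧ k ≤ hi - lo + 1)
  · simp only [hg, if_true]
  · simp only [hg, if_false]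
    have hg' := hg
    push Not at hg'
    obtain ⟨⟨hlo1, hlo2⟩, ⟨hhi1, hhi2⟩, hk1, hk2⟩ := hg'
    have hrange : ∀ i ∈ PySem.List.pyRange lo (hi + 1) 1, 1 ≤ i ∧ i ≤ 1000 := by
      intro i hi'
      rw [PySem.List.mem_pyRange_one] at hi'
      omega
    obtain ⟨hGood, hMono, hCont⟩ := pvLoop_spec (PySem.List.pyRange lo (hi + 1) 1) PySem.Dict.empty
      (by intro m w h; rw [PySem.Dict.get?_empty] at h; exact absurd h (by simp))
      (by intro i hi'; exact pvCs_all i (hrange i hi').1 (hrange i hi').2)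
    have hkey : ∀ i ∈ PySem.List.pyRange lo (hi + 1) 1,
        ((PySem.List.pyRange lo (hi + 1) 1).foldl
          (fun d i => if d.contains i then d else powerA 500 d [] i 0) PySem.Dict.empty).getD i 0 =
        stepsB 500 i 0 := by
      intro i hi'
      have hc := hCont i hi'
      rw [PySem.Dict.contains_eq_isSome_get?] at hc
      rcases hgi : ((PySem.List.pyRange lo (hi + 1) 1).foldl
          (fun d i => if d.contains i then d else powerA 500 d [] i 0) PySem.Dict.empty).get? i
        with _ | w
      · rw [hgi] at hc; simp at hc
      · obtain ⟨w', hw'⟩ := pvCs_all i (hrange i hi').1 (hrange i hi').2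
        have hww : w = w' := pvReach_unique (hGood i w hgi) ⟨500, hw'⟩
        rw [PySem.Dict.getD_of_get?_eq_some _ 0 hgi, hww,
            pvStepsB_of_cs 500 500 i 0 w' hw' (le_refl _)]
        omega
    rw [pvSorted_congr _ _ _ hkey]
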